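-- pv_equiv track=rewrite | github.com/Jean-Giono/PRJCTS | FL6_StockMaximize.py | stockmax
-- ===== SOURCE A (Python) =====
-- def stockmax(N, prices):
--     shares = 0
--     profit = 0
--     m = max(prices)
--
--     while len(prices) > 0:
--         day = prices.pop(0)
--         if day == m:
--             profit += day*shares
--             shares = 0
--             if len(prices) > 0:
--                 m = max(prices)
--         elif day < m:
--             profit -= day
--             shares += 1
--
--     return profit
-- ===== SOURCE B (Python) =====
-- def stockmax(N, prices):
--     # Single right-to-left pass: track the running maximum future price;
--     # every share is worth (best future price - purchase price).
--     profit = 0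
--     best = prices[-1]
--     for p in reversed(prices):
--         if p > best:
--             best = p
--         else:
--             profit += best - p
--     return profit
-- ===== Notes on version B (the rewrite author's own statement) =====
-- stated objective: faster
-- what changed: Replaces A's destructive pop-from-front loop with repeated max() recomputation (quadratic) by a single right-to-left pass tracking the running maximum future price.
import Mathlib
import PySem

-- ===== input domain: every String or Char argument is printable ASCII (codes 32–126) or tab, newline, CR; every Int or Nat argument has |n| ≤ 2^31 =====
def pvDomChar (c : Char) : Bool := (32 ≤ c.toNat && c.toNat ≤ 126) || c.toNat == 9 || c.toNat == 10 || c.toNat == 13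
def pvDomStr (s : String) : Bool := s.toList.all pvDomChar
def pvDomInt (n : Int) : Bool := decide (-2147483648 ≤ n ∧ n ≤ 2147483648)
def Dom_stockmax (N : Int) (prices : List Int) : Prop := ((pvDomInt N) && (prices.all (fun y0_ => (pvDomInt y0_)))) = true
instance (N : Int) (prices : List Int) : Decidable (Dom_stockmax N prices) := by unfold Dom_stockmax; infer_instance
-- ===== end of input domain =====

-- B replaces A's quadratic pop-from-front loop (repeated max() recomputation) by a single
-- right-to-left pass tracking the running maximum future price (objective: faster).
-- A mutates its `prices` argument in place (pop(0)); B does not — the equivalence proved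
-- here is about the RETURN value only.

-- ===== PORT A =====
-- the while loop of A: state (shares, profit, m), popping the head each iteration
def stockmaxLoopA : List Int → Int → Int → Int → Int
  | [], _, profit, _ => profit
  | day :: rest, shares, profit, m =>
    if day == m then
      let profit' := profit + day * shares
      let m' := if rest.length > 0 then (PySem.List.max? rest (fun y => y)).getD m else m
      stockmaxLoopA rest 0 profit' m'
    else if day < m then
      stockmaxLoopA rest (shares + 1) (profit - day) m
    else
      stockmaxLoopA rest shares profit m

def stockmax (N : Int) (prices : List Int) : Int :=
  -- m = max(prices): raises ValueError on []; Pre_stockmax excludes that input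
  stockmaxLoopA prices 0 0 ((PySem.List.max? prices (fun y => y)).getD 0)

-- ===== PORT B =====
-- the for loop of B over reversed(prices), state (best, profit)
def stockmaxLoopB : List Int → Int → Int → Int
  | [], _, profit => profit
  | p :: rest, best, profit =>
    if p > best then stockmaxLoopB rest p profit
    else stockmaxLoopB rest best (profit + (best - p))

def stockmax_alt (N : Int) (prices : List Int) : Int :=
  -- best = prices[-1]: raises IndexError on []; outside Pre_stockmax
  stockmaxLoopB prices.reverse ((PySem.List.pyGet? prices (-1)).getD 0) 0

-- ===== PRECONDITION & SPEC =====
-- Pre_ excludes only the empty list, on which Python A raises ValueError (max of empty sequence).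
def Pre_stockmax (N : Int) (prices : List Int) : Prop := prices ≠ []
instance (N : Int) (prices : List Int) : Decidable (Pre_stockmax N prices) := by unfold Pre_stockmax; infer_instance
def pvWitness_stockmax : Int × List Int := (3, [1, 3, 1, 2])

def Spec_stockmax (N : Int) (prices : List Int) (out : Int) : Prop := out = stockmax_alt N prices
instance (N : Int) (prices : List Int) (out : Int) : Decidable (Spec_stockmax N prices out) := by unfold Spec_stockmax; infer_instance

-- ===== CLAIM (what is proved, stated in full; the proofs are below) =====
def Claim_equal_stockmax : Prop := ∀ (N : Int) (prices : List Int), Dom_stockmax N prices → Pre_stockmax N prices → Spec_stockmax N prices (stockmax N prices)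

-- ===== LEMMAS AND PROOFS =====

-- the profit both programs compute: sum over the list of (max of the suffix starting here − element)
def W : List Int → Int
  | [] => 0
  | p :: rest => (rest.foldl max p - p) + W rest

-- the same sum, but with every suffix max additionally seeded by b
def V : List Int → Int → Int
  | [], _ => 0
  | p :: rest, b => (rest.foldl max (max b p) - p) + V rest b

theorem foldl_max_seed_comm (l : List Int) (b c : Int) :
    max (l.foldl max b) c = l.foldl max (max b c) := by
  induction l generalizing b with
  | nil => rfl
  | cons x t ih => simp only [List.foldl]; rw [ih, max_right_comm]

theorem foldl_max_le (l : List Int) (b m : Int) (hb : b ≤ m) (h : ∀ x ∈ l, x ≤ m) :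
    l.foldl max b ≤ m := by
  induction l generalizing b with
  | nil => exact hb
  | cons x t ih =>
    exact ih (max b x) (max_le hb (h x List.mem_cons_self)) (fun y hy => h y (List.mem_cons_of_mem _ hy))

theorem foldl_max_eq (l : List Int) (b m : Int) (hb : b ≤ m) (h : ∀ x ∈ l, x ≤ m) (hm : m ∈ l) :
    l.foldl max b = m :=
  le_antisymm (foldl_max_le l b m hb h) ((PySem.List.le_foldl_max l b).2 m hm)

-- B's loop: uniform step (contribution max best p − p, new best max best p)
theorem loopB_cons (p : Int) (r : List Int) (b pr : Int) :
    stockmaxLoopB (p :: r) b pr = stockmaxLoopB r (max b p) (pr + (max b p - p)) := by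
  by_cases h : p > b
  · simp [stockmaxLoopB, h, max_eq_right (le_of_lt h)]
  · simp [stockmaxLoopB, h, max_eq_left (le_of_not_gt h)]

theorem loopB_shift (l : List Int) (b pr : Int) :
    stockmaxLoopB l b pr = pr + stockmaxLoopB l b 0 := by
  induction l generalizing b pr with
  | nil => simp [stockmaxLoopB]
  | cons p r ih =>
    rw [loopB_cons, loopB_cons, ih (max b p) (pr + (max b p - p)),
      ih (max b p) (0 + (max b p - p))]
    ring

theorem loopB_append (r s : List Int) (b pr : Int) :
    stockmaxLoopB (r ++ s) b pr = stockmaxLoopB s (r.foldl max b) (pr + stockmaxLoopB r b 0) := by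
  induction r generalizing b pr with
  | nil => simp [stockmaxLoopB]
  | cons x t ih =>
    rw [List.cons_append, loopB_cons, ih, loopB_cons x t b 0,
      loopB_shift t (max b x) (0 + (max b x - x))]
    simp only [List.foldl_cons]
    congr 1
    ring

theorem foldl_max_reverse (l : List Int) (b : Int) :
    l.reverse.foldl max b = l.foldl max b := by
  induction l generalizing b with
  | nil => rfl
  | cons y s ih =>
    rw [List.reverse_cons, List.foldl_append, ih]
    exact foldl_max_seed_comm s b y

theorem loopB_reverse (l : List Int) (b : Int) :
    stockmaxLoopB l.reverse b 0 = V l b := by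
  induction l generalizing b with
  | nil => rfl
  | cons p t ih =>
    rw [List.reverse_cons, loopB_append, ih, loopB_cons, foldl_max_reverse]
    simp only [stockmaxLoopB, V]
    rw [foldl_max_seed_comm, max_comm]
    ring_nf

-- seeding by anything ≤ the last element does not change the suffix maxima
theorem V_eq_W (l : List Int) (b : Int) (h : l ≠ []) (hb : b ≤ l.getLast h) :
    V l b = W l := by
  induction l with
  | nil => exact absurd rfl h
  | cons p t ih =>
    cases t with
    | nil =>
      simp only [V, W, List.foldl]
      have : b ≤ p := by simpa [List.getLast] using hb
      rw [max_eq_right this]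
    | cons q s =>
      have ht : (q :: s) ≠ [] := by simp
      have hlast : b ≤ (q :: s).getLast ht := by
        simpa [List.getLast_cons] using hb
      have hmem : (q :: s).getLast ht ∈ (q :: s) := List.getLast_mem ht
      have e1 : V (p :: q :: s) b = ((q :: s).foldl max (max b p) - p) + V (q :: s) b := rfl
      have e2 : W (p :: q :: s) = ((q :: s).foldl max p - p) + W (q :: s) := rfl
      rw [e1, e2, ih ht hlast]
      congr 1
      have hble : b ≤ (q :: s).foldl max p := le_trans hlast ((PySem.List.le_foldl_max (q :: s) p).2 _ hmem)
      have : (q :: s).foldl max (max b p) = max b ((q :: s).foldl max p) := by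
        rw [max_comm b p, ← foldl_max_seed_comm, max_comm]
      rw [this, max_eq_right hble]

-- A's loop invariant: with m the max of the remaining list, the result is
-- profit + shares * m (pending shares all sell at m) + W of the remaining list
theorem loopA_eq (l : List Int) (shares profit m : Int)
    (hub : ∀ x ∈ l, x ≤ m) (hmem : m ∈ l) :
    stockmaxLoopA l shares profit m = profit + shares * m + W l := by
  induction l generalizing shares profit m with
  | nil => exact absurd hmem (List.not_mem_nil)
  | cons p rest ih =>
    have hub' : ∀ x ∈ rest, x ≤ m := fun x hx => hub x (List.mem_cons_of_mem _ hx)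
    have hpm : p ≤ m := hub p List.mem_cons_self
    by_cases heq : p = m
    · subst heq
      cases rest with
      | nil =>
        simp [stockmaxLoopA, W]
        ring
      | cons q s =>
        have hrest : stockmaxLoopA (p :: q :: s) shares profit p =
            stockmaxLoopA (q :: s) 0 (profit + p * shares) (s.foldl max q) := by
          simp [stockmaxLoopA, PySem.List.max?_id_cons]
        rw [hrest]
        have hub'' : ∀ x ∈ (q :: s), x ≤ s.foldl max q := by
          intro x hx
          rcases List.mem_cons.1 hx with h | h
          · exact h ▸ (PySem.List.le_foldl_max s q).1
          · exact (PySem.List.le_foldl_max s q).2 x h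
        have hmem'' : s.foldl max q ∈ (q :: s) := by
          rcases PySem.List.foldl_max_mem s q with h | h
          · rw [h]; exact List.mem_cons_self
          · exact List.mem_cons_of_mem _ h
        rw [ih 0 (profit + p * shares) (s.foldl max q) hub'' hmem'']
        simp only [W]
        have hfold : (q :: s).foldl max p = p := by
          refine le_antisymm (foldl_max_le _ p p (le_refl p) hub') ?_
          exact (PySem.List.le_foldl_max (q :: s) p).1
        rw [hfold]
        ring
    · have hlt : p < m := lt_of_le_of_ne hpm heq
      have hmem' : m ∈ rest := by
        rcases List.mem_cons.1 hmem with h | h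
        · exact absurd h.symm heq
        · exact h
      have : stockmaxLoopA (p :: rest) shares profit m =
          stockmaxLoopA rest (shares + 1) (profit - p) m := by
        simp [stockmaxLoopA, hlt, heq]
      rw [this, ih (shares + 1) (profit - p) m hub' hmem']
      simp only [W]
      rw [foldl_max_eq rest p m hpm hub' hmem']
      ring

-- ===== VERDICT (by name: the statement is the Claim_ definition above) =====
theorem stockmax_spec : Claim_equal_stockmax := by
  intro N prices _ hpre
  unfold Spec_stockmax
  cases prices with
  | nil => exact absurd rfl hpre
  | cons p rest =>
    unfold stockmax stockmax_alt
    rw [PySem.List.max?_id_cons, PySem.List.pyGet?_neg_one]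
    have hne : (p :: rest) ≠ [] := by simp
    have hlast : (p :: rest).getLast? = some ((p :: rest).getLast hne) := List.getLast?_eq_some_getLast hne
    rw [hlast]
    simp only [Option.getD_some]
    rw [loopB_reverse, V_eq_W (p :: rest) _ hne (le_refl _)]
    have hub : ∀ x ∈ (p :: rest), x ≤ rest.foldl max p := by
      intro x hx
      rcases List.mem_cons.1 hx with h | h
      · exact h ▸ (PySem.List.le_foldl_max rest p).1
      · exact (PySem.List.le_foldl_max rest p).2 x h
    have hmem : rest.foldl max p ∈ (p :: rest) := by
      rcases PySem.List.foldl_max_mem rest p with h | h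
      · rw [h]; exact List.mem_cons_self
      · exact List.mem_cons_of_mem _ h
    rw [loopA_eq (p :: rest) 0 0 (rest.foldl max p) hub hmem]
    ring
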